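-- pv_equiv track=rewrite | github.com/Paberu/learning | 28exes/28exec26/hodor.py | white_walkers
-- ===== SOURCE A (Python) =====
-- def white_walkers(village):
--     start_num = -1
--     white_walkers_count = 0
--     found = False
--     for folk in village:
--         if folk == '=':
--             white_walkers_count += 1
--         elif folk.isdecimal():
--             if start_num == -1:
--                 start_num = int(folk)
--                 white_walkers_count = 0
--             else:
--                 finish_num = int(folk)
--                 if finish_num + start_num == 10:
--                     if white_walkers_count not in (0, 3):
--                         return False
--                     elif white_walkers_count == 3:
--                         white_walkers_count = 0
--                         start_num = finish_num
--                         found = True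
--                     else:
--                         start_num = finish_num
--                 else:
--                     white_walkers_count = 0
--                     start_num = finish_num
--     return found
-- ===== SOURCE B (Python) =====
-- def white_walkers(village):
--     # Pass 1: tokenize into (digit value, number of '=' seen since the previous digit).
--     tokens = []
--     equals = 0
--     for folk in village:
--         if folk == '=':
--             equals += 1
--         elif folk.isdecimal():
--             tokens.append((int(folk), equals))
--             equals = 0
--     # Pass 2: scan consecutive digit pairs, accumulating the '=' count per A's reset rules.
--     found = False
--     if not tokens:
--         return False
--     prev = tokens[0][0]
--     count = 0
--     for cur, gap in tokens[1:]:
--         count += gap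
--         if prev + cur == 10:
--             if count not in (0, 3):
--                 return False
--             if count == 3:
--                 count = 0
--                 found = True
--         else:
--             count = 0
--         prev = cur
--     return found
-- ===== Notes on version B (the rewrite author's own statement) =====
-- stated objective: alternative
-- what changed: A's single fused state machine (tracking start_num, a '=' counter and found in one loop with in-loop transitions) is split into two passes: a tokenizer that collects (digit, '='-gap) records, then a pairwise scan over consecutive digit records that applies the sum-to-10 rules.
import Mathlib
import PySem

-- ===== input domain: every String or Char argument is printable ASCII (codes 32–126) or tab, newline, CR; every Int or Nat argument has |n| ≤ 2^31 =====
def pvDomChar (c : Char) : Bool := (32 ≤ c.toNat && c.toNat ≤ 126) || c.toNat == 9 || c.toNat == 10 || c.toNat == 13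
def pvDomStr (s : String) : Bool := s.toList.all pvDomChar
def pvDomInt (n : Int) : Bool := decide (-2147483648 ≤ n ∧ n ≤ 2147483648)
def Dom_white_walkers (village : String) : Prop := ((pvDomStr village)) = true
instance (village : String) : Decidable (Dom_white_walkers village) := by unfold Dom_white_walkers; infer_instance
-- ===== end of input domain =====

-- B replaces A's fused state machine by two passes — tokenize digits with their '='-gaps, then
-- scan consecutive digit pairs — for clarity (objective: alternative decomposition, same cost).


-- int(folk) for a single decimal-digit char; exact since the isdigit guard holds ('0'..'9' on ASCII,
-- where Python's isdecimal coincides with isdigit).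
def pvDigitVal (c : Char) : Int := (c.toNat : Int) - 48

-- ===== PORT A =====
-- the for-loop of A over (start_num, white_walkers_count, found); `return False` exits with false
def wwLoopA : List Char → Int → Int → Bool → Bool
  | [], _, _, found => found
  | folk :: rest, start, cnt, found =>
    if folk = '=' then wwLoopA rest start (cnt + 1) found
    else if PySem.Chars.isdigit folk then
      if start = -1 then wwLoopA rest (pvDigitVal folk) 0 found
      else
        let finish := pvDigitVal folk
        if finish + start = 10 then
          if ¬(cnt = 0 ∨ cnt = 3) then false
          else if cnt = 3 then wwLoopA rest finish 0 true
          else wwLoopA rest finish cnt found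
        else wwLoopA rest finish 0 found
    else wwLoopA rest start cnt found

def white_walkers (village : String) : Bool := wwLoopA village.toList (-1) 0 false

-- ===== PORT B =====
-- pass 1 of Source B: (digit value, number of '=' since the previous digit) tokens
def wwTok : List Char → Int → List (Int × Int)
  | [], _ => []
  | folk :: rest, equals =>
    if folk = '=' then wwTok rest (equals + 1)
    else if PySem.Chars.isdigit folk then (pvDigitVal folk, equals) :: wwTok rest 0
    else wwTok rest equals

-- pass 2 of Source B: scan tokens[1:] keeping (prev, count, found)
def wwScan : Int → List (Int × Int) → Int → Bool → Bool
  | _, [], _, found => found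
  | prev, (cur, gap) :: rest, count, found =>
    let c := count + gap
    if prev + cur = 10 then
      if ¬(c = 0 ∨ c = 3) then false
      else if c = 3 then wwScan cur rest 0 true
      else wwScan cur rest c found
    else wwScan cur rest 0 found

def white_walkers_alt (village : String) : Bool :=
  match wwTok village.toList 0 with
  | [] => false
  | (v, _) :: rest => wwScan v rest 0 false

-- ===== PRECONDITION & SPEC =====
def Spec_white_walkers (village : String) (out : Bool) : Prop := out = white_walkers_alt village
instance (village : String) (out : Bool) : Decidable (Spec_white_walkers village out) := by unfold Spec_white_walkers; infer_instance

-- ===== CLAIM (what is proved, stated in full; the proofs are below) =====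
def Claim_equal_white_walkers : Prop := ∀ (village : String), Dom_white_walkers village → Spec_white_walkers village (white_walkers village)

-- ===== LEMMAS AND PROOFS =====

theorem digitVal_ne_neg_one (c : Char) (h : PySem.Chars.isdigit c = true) :
    pvDigitVal c ≠ -1 := by
  unfold PySem.Chars.isdigit at h
  simp [Char.le_def, UInt32.le_iff_toNat_le] at h
  have h3 : (48 : Nat) ≤ c.toNat := h.1
  unfold pvDigitVal
  omega

-- moving one '=' from the tokenizer's accumulator into the scanner's count changes nothing
theorem wwScan_tok_shift (chars : List Char) :
    ∀ (s : Int) (eq c : Int) (f : Bool),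
      wwScan s (wwTok chars (eq + 1)) c f = wwScan s (wwTok chars eq) (c + 1) f := by
  induction chars with
  | nil => intro s eq c f; simp [wwTok, wwScan]
  | cons folk rest ih =>
    intro s eq c f
    by_cases he : folk = '='
    · simp only [wwTok, if_pos he]
      rw [ih s (eq + 1) c f]
    · by_cases hd : PySem.Chars.isdigit folk = true
      · simp only [wwTok, if_neg he, if_pos hd, wwScan]
        have h : c + (eq + 1) = (c + 1) + eq := by ring
        rw [h]
      · simp only [wwTok, if_neg he, if_neg hd]
        exact ih s eq c f

-- live phase: once a first digit is held, A's loop is B's pair scan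
theorem loopA_eq_scan (chars : List Char) :
    ∀ (s c : Int) (f : Bool), s ≠ -1 →
      wwLoopA chars s c f = wwScan s (wwTok chars 0) c f := by
  induction chars with
  | nil => intro s c f _; simp [wwLoopA, wwTok, wwScan]
  | cons folk rest ih =>
    intro s c f hs
    by_cases he : folk = '='
    · simp only [wwLoopA, wwTok, if_pos he]
      rw [wwScan_tok_shift rest s 0 c f]
      exact ih s (c + 1) f hs
    · by_cases hd : PySem.Chars.isdigit folk = true
      · simp only [wwLoopA, wwTok, if_neg he, if_pos hd, if_neg hs, wwScan]
        have hv := digitVal_ne_neg_one folk hd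
        simp only [add_zero]
        rw [add_comm s (pvDigitVal folk)]
        by_cases h10 : pvDigitVal folk + s = 10
        · simp only [if_pos h10]
          by_cases hc : ¬(c = 0 ∨ c = 3)
          · simp only [if_pos hc]
          · simp only [if_neg hc]
            by_cases h3 : c = 3
            · simp only [if_pos h3]; exact ih _ 0 true hv
            · simp only [if_neg h3]; exact ih _ c f hv
        · simp only [if_neg h10]; exact ih _ 0 f hv
      · simp only [wwLoopA, wwTok, if_neg he, if_neg hd]
        exact ih s c f hs

-- search phase: before the first digit A's count is irrelevant, as is B's accumulator
theorem loopA_eq_alt (chars : List Char) :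
    ∀ (c eq : Int),
      wwLoopA chars (-1) c false =
        (match wwTok chars eq with
         | [] => false
         | (v, _) :: rest => wwScan v rest 0 false) := by
  induction chars with
  | nil => intro c eq; simp [wwLoopA, wwTok]
  | cons folk rest ih =>
    intro c eq
    by_cases he : folk = '='
    · simp only [wwLoopA, wwTok, if_pos he]
      exact ih (c + 1) (eq + 1)
    · by_cases hd : PySem.Chars.isdigit folk = true
      · simp only [wwLoopA, wwTok, if_neg he, if_pos hd]
        exact loopA_eq_scan rest (pvDigitVal folk) 0 false (digitVal_ne_neg_one folk hd)
      · simp only [wwLoopA, wwTok, if_neg he, if_neg hd]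
        exact ih c eq

-- ===== VERDICT (by name: the statement is the Claim_ definition above) =====
theorem white_walkers_spec : Claim_equal_white_walkers := by
  intro village _
  unfold Spec_white_walkers white_walkers white_walkers_alt
  exact loopA_eq_alt village.toList 0 0
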